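-- pv_equiv track=rewrite | github.com/ssangervasi/oily | oily/divisibility_streaks.py | is_streak
-- ===== SOURCE A (Python) =====
-- def is_streak(ending_at: int, streak_size: int) -> bool:
-- 	# Streak does not end here if the next number continues the streak.
-- 	if is_divisible(ending_at + 1, streak_size + 1):
-- 		return False
--
-- 	# Step backwards because higher streaks are less common, which will let
-- 	# us return earlier for high numbers:
-- 	for back_step in range(0, streak_size):
-- 		earlier_streak_number = ending_at - back_step
-- 		earlier_streak_size = streak_size - back_step
-- 		if not is_divisible(earlier_streak_number, earlier_streak_size):
-- 			return False
--
-- 	return True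
--
-- def is_divisible(dividend: int, divisor: int) -> bool:
-- 	return (dividend % divisor) == 0
-- ===== SOURCE B (Python) =====
-- def is_streak(ending_at: int, streak_size: int) -> bool:
-- 	# Streak does not end here if the next number continues the streak.
-- 	if (ending_at + 1) % (streak_size + 1) == 0:
-- 		return False
--
-- 	# ending_at - b divisible by streak_size - b for every b in range(0, streak_size)
-- 	# iff every d in 1..streak_size divides ending_at - streak_size,
-- 	# iff the running lcm of 1..streak_size divides ending_at - streak_size.
-- 	d = ending_at - streak_size
-- 	lcm = 1
-- 	for k in range(1, streak_size + 1):
-- 		a, b = lcm, k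
-- 		while b:
-- 			a, b = b, a % b
-- 		lcm = lcm * k // a
-- 		if d % lcm != 0:
-- 			return False
-- 		if abs(d) < lcm:
-- 			# lcm divides d and exceeds |d|, so d == 0: every later lcm divides it too.
-- 			return True
-- 	return True
-- ===== Notes on version B (the rewrite author's own statement) =====
-- stated objective: alternative
-- what changed: Replaces A's per-back_step scan of modulo checks with a single divisibility test of ending_at - streak_size against the lcm of 1..streak_size (computed once with a gcd loop), keeping A's top guard verbatim.
import Mathlib
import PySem

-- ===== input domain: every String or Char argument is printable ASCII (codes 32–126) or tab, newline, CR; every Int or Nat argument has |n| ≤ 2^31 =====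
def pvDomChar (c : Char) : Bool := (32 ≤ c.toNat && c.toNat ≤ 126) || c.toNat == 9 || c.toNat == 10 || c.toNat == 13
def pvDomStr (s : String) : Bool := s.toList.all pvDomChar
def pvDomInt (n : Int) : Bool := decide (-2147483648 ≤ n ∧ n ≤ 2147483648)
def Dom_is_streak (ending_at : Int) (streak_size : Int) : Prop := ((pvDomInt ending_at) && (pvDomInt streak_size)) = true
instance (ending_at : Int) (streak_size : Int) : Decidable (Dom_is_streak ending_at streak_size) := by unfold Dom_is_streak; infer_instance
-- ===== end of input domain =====

-- B replaces A's per-divisor backwards scan by a single divisibility test of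
-- ending_at - streak_size against the lcm of 1..streak_size (alternative decomposition, same cost class).

-- ===== PORT A =====
def is_divisible (dividend : Int) (divisor : Int) : Bool :=
  PySem.Int.mod dividend divisor == 0

-- for back_step in range(0, streak_size): early return False on a failed check, True after the loop
def is_streak_loop (ending_at : Int) (streak_size : Int) (back_step : Int) : Bool :=
  if back_step < streak_size then
    let earlier_streak_number := ending_at - back_step
    let earlier_streak_size := streak_size - back_step
    if ¬ is_divisible earlier_streak_number earlier_streak_size then false
    else is_streak_loop ending_at streak_size (back_step + 1)
  else true
termination_by (streak_size - back_step).toNat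
decreasing_by omega

def is_streak (ending_at : Int) (streak_size : Int) : Bool :=
  if is_divisible (ending_at + 1) (streak_size + 1) then false
  else is_streak_loop ending_at streak_size 0

-- ===== PORT B =====
-- while b: a, b = b, a % b
def gcdLoop (a : Int) (b : Int) : Int :=
  if h : b = 0 then a
  else gcdLoop b (PySem.Int.mod a b)
termination_by b.natAbs
decreasing_by
  rcases lt_or_gt_of_ne h with hb | hb
  · have h1 := PySem.Int.mod_neg_bounds a hb
    omega
  · have h1 := PySem.Int.mod_nonneg a hb
    have h2 := PySem.Int.mod_lt a hb
    omega

-- for k in range(1, streak_size+1): update lcm, early return on the two checks; True after the loop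
def alt_loop (d : Int) (streak_size : Int) (k : Int) (lcm : Int) : Bool :=
  if k < streak_size + 1 then
    let lcm' := PySem.Int.floordiv (lcm * k) (gcdLoop lcm k)
    if PySem.Int.mod d lcm' != 0 then false
    else if |d| < lcm' then true
    else alt_loop d streak_size (k + 1) lcm'
  else true
termination_by (streak_size + 1 - k).toNat
decreasing_by omega

def is_streak_alt (ending_at : Int) (streak_size : Int) : Bool :=
  if PySem.Int.mod (ending_at + 1) (streak_size + 1) == 0 then false
  else
    let d := ending_at - streak_size
    alt_loop d streak_size 1 1

-- ===== PRECONDITION & SPEC =====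
-- Pre_ excludes only streak_size = -1, where the Python A (and B) raise ZeroDivisionError on (ending_at+1) % (streak_size+1).
def Pre_is_streak (ending_at : Int) (streak_size : Int) : Prop := streak_size ≠ -1
instance (ending_at : Int) (streak_size : Int) : Decidable (Pre_is_streak ending_at streak_size) := by unfold Pre_is_streak; infer_instance
def pvWitness_is_streak : Int × Int := (2, 1)

def Spec_is_streak (ending_at : Int) (streak_size : Int) (out : Bool) : Prop := out = is_streak_alt ending_at streak_size
instance (ending_at : Int) (streak_size : Int) (out : Bool) : Decidable (Spec_is_streak ending_at streak_size out) := by unfold Spec_is_streak; infer_instance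

-- ===== CLAIM (what is proved, stated in full; the proofs are below) =====
def Claim_equal_is_streak : Prop := ∀ (ending_at : Int) (streak_size : Int), Dom_is_streak ending_at streak_size → Pre_is_streak ending_at streak_size → Spec_is_streak ending_at streak_size (is_streak ending_at streak_size)

-- ===== LEMMAS AND PROOFS =====

-- gcdLoop on nonnegative inputs computes Nat.gcd (in the flipped-argument form the loop uses)
lemma gcdLoop_natCast : ∀ (n m : Nat), gcdLoop (m : Int) (n : Int) = (Nat.gcd m n : Int) := by
  intro n
  induction n using Nat.strong_induction_on with
  | _ n ih =>
    intro m
    rw [gcdLoop]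
    by_cases h : n = 0
    · subst h; simp
    · have hn : ((n : Int) = 0) = False := by simp [h]
      simp only [hn, dite_false]
      rw [PySem.Int.mod_natCast]
      rw [ih (m % n) (Nat.mod_lt m (Nat.pos_of_ne_zero h))]
      rw [Nat.gcd_comm n (m % n), ← Nat.gcd_rec n m, Nat.gcd_comm n m]

-- one body of B's fold computes Nat.lcm
lemma step_natCast (m n : Nat) :
    PySem.Int.floordiv ((m : Int) * (n : Int)) (gcdLoop (m : Int) (n : Int)) = (Nat.lcm m n : Int) := by
  rw [gcdLoop_natCast, ← Int.natCast_mul, PySem.Int.floordiv_natCast]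
  rfl

-- the running lcm of 1..m
def lcmAcc : Nat → Nat
  | 0 => 1
  | m + 1 => Nat.lcm (lcmAcc m) (m + 1)

lemma lcmAcc_dvd_mono (j m : Nat) (h : j ≤ m) : lcmAcc j ∣ lcmAcc m := by
  induction m with
  | zero => simp_all [lcmAcc]
  | succ m ih =>
    rcases Nat.lt_or_ge j (m + 1) with hj | hj
    · exact dvd_trans (ih (by omega)) (Nat.dvd_lcm_left _ _)
    · have : j = m + 1 := by omega
      subst this; exact dvd_refl _

-- B's loop, entered with the running lcm of 1..j, decides whether lcm(1..m) divides d
lemma alt_iff (d : Int) (m : Nat) : ∀ (fuel j : Nat), m - j = fuel → j ≤ m → ((lcmAcc j : Int) ∣ d) →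
    (alt_loop d (m : Int) ((j : Int) + 1) (lcmAcc j) = true ↔ ((lcmAcc m : Int) ∣ d)) := by
  intro fuel
  induction fuel using Nat.strong_induction_on with
  | _ fuel ih =>
    intro j hf hj hdvd
    rw [alt_loop]
    by_cases hlt : (j : Int) + 1 < (m : Int) + 1
    · rw [if_pos hlt]
      have hj' : j < m := by omega
      have hstep : PySem.Int.floordiv ((lcmAcc j : Int) * ((j : Int) + 1)) (gcdLoop (lcmAcc j) ((j : Int) + 1)) = (lcmAcc (j + 1) : Int) := by
        have hc : ((j : Int) + 1) = ((j + 1 : Nat) : Int) := by push_cast; ring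
        rw [hc, step_natCast]
        rfl
      simp only [hstep]
      by_cases hd : (lcmAcc (j + 1) : Int) ∣ d
      · rw [if_neg (by simp [(PySem.Int.mod_eq_zero_iff_dvd _ _).mpr hd])]
        by_cases habs : |d| < (lcmAcc (j + 1) : Int)
        · rw [if_pos habs]
          have hd0 : d = 0 := Int.eq_zero_of_abs_lt_dvd hd habs
          subst hd0
          simp
        · rw [if_neg habs]
          have hc : ((j : Int) + 1) + 1 = ((j + 1 : Nat) : Int) + 1 := by push_cast; ring
          rw [hc]
          exact ih (m - (j + 1)) (by omega) (j + 1) rfl (by omega) hd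
      · rw [if_pos (by simp [hd, PySem.Int.mod_eq_zero_iff_dvd])]
        simp only [Bool.false_eq_true, false_iff]
        intro hm
        exact hd (dvd_trans (Int.natCast_dvd_natCast.mpr (lcmAcc_dvd_mono (j + 1) m (by omega))) hm)
    · rw [if_neg hlt]
      have : j = m := by omega
      subst this
      simp [hdvd]

lemma lcmAcc_dvd_iff (m : Nat) (x : Int) :
    ((lcmAcc m : Int) ∣ x) ↔ ∀ k : Nat, 1 ≤ k → k ≤ m → (k : Int) ∣ x := by
  induction m with
  | zero =>
    simp only [lcmAcc, Nat.cast_one, one_dvd, true_iff]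
    intro k hk1 hk2; omega
  | succ m ih =>
    constructor
    · intro h k hk1 hk2
      rcases Nat.lt_or_ge k (m + 1) with hk | hk
      · exact ih.mp (dvd_trans (Int.natCast_dvd_natCast.mpr (Nat.dvd_lcm_left _ _)) h) k hk1 (by omega)
      · have : k = m + 1 := by omega
        subst this
        exact dvd_trans (Int.natCast_dvd_natCast.mpr (Nat.dvd_lcm_right _ _)) h
    · intro h
      rw [Int.natCast_dvd]
      refine Nat.lcm_dvd ?_ ?_
      · rw [← Int.natCast_dvd]
        exact ih.mpr fun k hk1 hk2 => h k hk1 (by omega)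
      · rw [← Int.natCast_dvd]
        exact h (m + 1) (by omega) (by omega)

-- A's loop returns true iff every remaining back_step passes its divisibility check
lemma loop_iff (n s : Int) : ∀ (fuel : Nat) (b0 : Int), (s - b0).toNat = fuel →
    (is_streak_loop n s b0 = true ↔ ∀ b : Int, b0 ≤ b → b < s → (s - b) ∣ (n - b)) := by
  intro fuel
  induction fuel using Nat.strong_induction_on with
  | _ fuel ih =>
    intro b0 hf
    rw [is_streak_loop]
    by_cases hlt : b0 < s
    · rw [if_pos hlt]
      by_cases hd : is_divisible (n - b0) (s - b0) = true
      · rw [if_neg (by simp [hd])]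
        rw [ih (s - (b0 + 1)).toNat (by omega) (b0 + 1) rfl]
        unfold is_divisible at hd
        rw [beq_iff_eq, PySem.Int.mod_eq_zero_iff_dvd] at hd
        constructor
        · intro h b hb1 hb2
          rcases eq_or_lt_of_le hb1 with he | hlt2
          · rw [← he]; exact hd
          · exact h b (by omega) hb2
        · intro h b hb1 hb2
          exact h b (by omega) hb2
      · rw [if_pos (by simp [hd])]
        simp only [Bool.false_eq_true, false_iff]
        intro hall
        apply hd
        unfold is_divisible
        rw [beq_iff_eq, PySem.Int.mod_eq_zero_iff_dvd]
        exact hall b0 le_rfl hlt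
    · rw [if_neg hlt]
      simp only [true_iff]
      intro b hb1 hb2
      exact absurd (lt_of_le_of_lt hb1 hb2) hlt

-- A's backwards scan over back_step ∈ [0, s) is the divisor scan over d ∈ [1, s] applied to n - s
lemma scan_iff (n s : Int) (m : Nat) (hs : s = (m : Int)) :
    (∀ b : Int, 0 ≤ b → b < s → (s - b) ∣ (n - b)) ↔
      (∀ k : Nat, 1 ≤ k → k ≤ m → (k : Int) ∣ (n - s)) := by
  constructor
  · intro h k hk1 hk2
    have hb := h (s - (k : Int)) (by omega) (by omega)
    have he : s - (s - (k : Int)) = (k : Int) := by ring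
    rw [he] at hb
    have he2 : n - (s - (k : Int)) = (n - s) + (k : Int) := by ring
    rw [he2] at hb
    have := dvd_sub hb (dvd_refl (k : Int))
    simpa using this
  · intro h b hb1 hb2
    have hk1 : 1 ≤ (s - b).toNat := by omega
    have hk2 : (s - b).toNat ≤ m := by omega
    have hd := h (s - b).toNat hk1 hk2
    have he : ((s - b).toNat : Int) = s - b := by omega
    rw [he] at hd
    have := dvd_add hd (dvd_refl (s - b))
    have he2 : (n - s) + (s - b) = n - b := by ring
    rw [he2] at this
    exact this

-- ===== VERDICT (by name: the statement is the Claim_ definition above) =====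
theorem is_streak_spec : Claim_equal_is_streak := by
  intro n s _ _
  unfold Spec_is_streak
  unfold is_streak is_streak_alt is_divisible
  by_cases hg : (PySem.Int.mod (n + 1) (s + 1) == 0) = true
  · simp only [hg, if_true]
  · simp only [Bool.not_eq_true] at hg
    simp only [hg, Bool.false_eq_true, if_false]
    rcases le_or_gt s 0 with hs | hs
    · have hA : is_streak_loop n s 0 = true := by
        rw [loop_iff n s (s - 0).toNat 0 rfl]
        intro b hb1 hb2
        exact absurd (lt_of_le_of_lt hb1 hb2) (by omega)
      have hB : alt_loop (n - s) s 1 1 = true := by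
        rw [alt_loop, if_neg (by omega)]
      rw [hA, hB]
    · set m := s.toNat with hm
      have hsm : s = (m : Int) := by omega
      rw [hsm]
      rw [Bool.eq_iff_iff]
      rw [loop_iff n (m : Int) ((m : Int) - 0).toNat 0 rfl]
      have halt := alt_iff (n - (m : Int)) m m 0 (by omega) (by omega) (by simp [lcmAcc])
      simp only [Nat.cast_zero, zero_add, lcmAcc, Nat.cast_one] at halt
      rw [halt]
      rw [lcmAcc_dvd_iff]
      exact scan_iff n (m : Int) m rfl
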